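-- pv_equiv track=rewrite | github.com/kuterd/nv_isa_solver | life_range.py | get_interaction_ranges
-- ===== SOURCE A (Python) =====
-- def get_interaction_ranges(reg_interactions):
--     if not reg_interactions:
--         return None
--     result = {}
--     for file, interactions in reg_interactions.items():
--         current = None
--         length = 0
--         intr_type = None
--         result[file] = []
--
--         def push():
--             if current is not None:
--                 result[file].append((current, intr_type, length))
--
--         for intr in interactions:
--             if (
--                 current is not None
--                 and current + length == intr[0]
--                 and intr_type == intr[1]
--             ):
--                 length += 1
--             else:
--                 push()
--                 current = intr[0]
--                 intr_type = intr[1]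
--                 length = 1
--         push()
--     return result
-- ===== SOURCE B (Python) =====
-- def get_interaction_ranges(reg_interactions):
--     if not reg_interactions:
--         return None
--     return {file: _runs(intrs) for file, intrs in reg_interactions.items()}
--
--
-- def _runs(intrs):
--     out = []
--     i = 0
--     n = len(intrs)
--     while i < n:
--         start, typ = intrs[i]
--         j = i + 1
--         while j < n and intrs[j] == (start + (j - i), typ):
--             j += 1
--         out.append((start, typ, j - i))
--         i = j
--     return out
-- ===== Notes on version B (the rewrite author's own statement) =====
-- stated objective: alternative
-- what changed: A runs a single state-machine fold per file (current/type/length with a push closure); B instead peels maximal runs off the front with an outer loop and an inner scan that extends each run, emitting (start, type, run length) directly.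
import Mathlib
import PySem

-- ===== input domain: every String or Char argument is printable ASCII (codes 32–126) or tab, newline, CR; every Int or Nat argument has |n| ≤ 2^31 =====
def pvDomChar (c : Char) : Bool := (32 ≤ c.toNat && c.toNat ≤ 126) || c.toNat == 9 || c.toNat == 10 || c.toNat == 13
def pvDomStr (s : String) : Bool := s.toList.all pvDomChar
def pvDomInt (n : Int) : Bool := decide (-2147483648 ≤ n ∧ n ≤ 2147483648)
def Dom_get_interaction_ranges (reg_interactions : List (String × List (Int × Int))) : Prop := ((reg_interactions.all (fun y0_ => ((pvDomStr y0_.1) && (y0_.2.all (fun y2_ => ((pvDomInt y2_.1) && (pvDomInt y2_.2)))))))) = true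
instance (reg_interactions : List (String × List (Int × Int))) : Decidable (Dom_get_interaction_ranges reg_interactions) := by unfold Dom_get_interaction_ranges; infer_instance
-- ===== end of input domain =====

-- B re-implements A's per-file run-length state machine as run-peeling (an outer loop that
-- extends each run with an inner scan); alternative decomposition, same O(n) cost.

-- ===== PORT A =====
-- one iteration of A's inner 'for intr in interactions' loop; state = (current+intr_type, length, result[file])
def aStep (st : Option (Int × Int) × Int × List (Int × Int × Int)) (intr : Int × Int) :
    Option (Int × Int) × Int × List (Int × Int × Int) :=
  match st with
  | (some (c, t), len, acc) =>
      if c + len = intr.1 ∧ t = intr.2 then (some (c, t), len + 1, acc)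
      else (some (intr.1, intr.2), 1, acc ++ [(c, t, len)])
  | (none, _, acc) => (some (intr.1, intr.2), 1, acc)

-- A's 'push()'
def aPush (st : Option (Int × Int) × Int × List (Int × Int × Int)) : List (Int × Int × Int) :=
  match st with
  | (some (c, t), len, acc) => acc ++ [(c, t, len)]
  | (none, _, acc) => acc

-- A's per-file body: run the loop from (current=None, length=0, result[file]=[]) then push()
def aRun (interactions : List (Int × Int)) : List (Int × Int × Int) :=
  aPush (interactions.foldl aStep (none, 0, []))

def get_interaction_ranges (reg_interactions : List (String × List (Int × Int))) :
    Option (List (String × List (Int × Int × Int))) :=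
  if reg_interactions = [] then none
  else some ((reg_interactions.foldl
      (fun d p => PySem.Dict.insert d p.1 (aRun p.2)) PySem.Dict.empty).items)

-- ===== PORT B =====
-- B's inner while loop: how many further elements extend the run (start,typ) whose next expected
-- register offset is off
def bExt (s t off : Int) : List (Int × Int) → Nat
  | [] => 0
  | p :: rest => if p.1 = s + off ∧ p.2 = t then 1 + bExt s t (off + 1) rest else 0

-- B's outer while loop: peel one maximal run off the front, emit it, continue after it
def bRuns : List (Int × Int) → List (Int × Int × Int)
  | [] => []
  | p :: rest =>
      let k := bExt p.1 p.2 1 rest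
      (p.1, p.2, (1 + k : Int)) :: bRuns (rest.drop k)
termination_by l => l.length
decreasing_by
  have : (rest.drop (bExt p.1 p.2 1 rest)).length ≤ rest.length :=
    by simp [List.length_drop]
  simp only [List.length_cons]
  omega

def get_interaction_ranges_alt (reg_interactions : List (String × List (Int × Int))) :
    Option (List (String × List (Int × Int × Int))) :=
  if reg_interactions = [] then none
  else some (reg_interactions.map (fun p => (p.1, bRuns p.2)))

-- ===== PRECONDITION & SPEC =====
-- Pre_ excludes association lists with duplicate file keys: they do not represent any Python
-- dict (A's argument is a dict, whose keys are unique), so the list encoding is ambiguous there.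
def Pre_get_interaction_ranges (reg_interactions : List (String × List (Int × Int))) : Prop :=
  (reg_interactions.map Prod.fst).Nodup
instance (reg_interactions : List (String × List (Int × Int))) : Decidable (Pre_get_interaction_ranges reg_interactions) := by unfold Pre_get_interaction_ranges; infer_instance

def pvWitness_get_interaction_ranges : (List (String × List (Int × Int))) :=
  [("a", [(0, 0), (1, 0), (3, 1)]), ("b", [])]

def Spec_get_interaction_ranges (reg_interactions : List (String × List (Int × Int))) (out : Option (List (String × List (Int × Int × Int)))) : Prop := out = get_interaction_ranges_alt reg_interactions
instance (reg_interactions : List (String × List (Int × Int))) (out : Option (List (String × List (Int × Int × Int)))) : Decidable (Spec_get_interaction_ranges reg_interactions out) := by unfold Spec_get_interaction_ranges; infer_instance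

-- ===== CLAIM (what is proved, stated in full; the proofs are below) =====
def Claim_equal_get_interaction_ranges : Prop := ∀ (reg_interactions : List (String × List (Int × Int))), Dom_get_interaction_ranges reg_interactions → Pre_get_interaction_ranges reg_interactions → Spec_get_interaction_ranges reg_interactions (get_interaction_ranges reg_interactions)

-- ===== LEMMAS AND PROOFS =====

-- an in-progress run (s,t) of length len absorbs exactly bExt s t len rest further elements,
-- then is pushed and the loop restarts from a fresh state
theorem aRun_runfold (rest : List (Int × Int)) (s t : Int) :
    ∀ (len : Int) (acc : List (Int × Int × Int)),
      aPush (rest.foldl aStep (some (s, t), len, acc)) =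
      aPush ((rest.drop (bExt s t len rest)).foldl aStep
        (none, 0, acc ++ [(s, t, len + bExt s t len rest)])) := by
  induction rest with
  | nil => intro len acc; simp [bExt, aPush]
  | cons p r ih =>
      intro len acc
      by_cases h : p.1 = s + len ∧ p.2 = t
      · have hb : bExt s t len (p :: r) = 1 + bExt s t (len + 1) r := by
          simp [bExt, h]
        have hstep : aStep (some (s, t), len, acc) p = (some (s, t), len + 1, acc) := by
          simp [aStep, h.1.symm, h.2.symm]
        calc aPush ((p :: r).foldl aStep (some (s, t), len, acc))
            = aPush (r.foldl aStep (some (s, t), len + 1, acc)) := by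
              simp [List.foldl_cons, hstep]
          _ = aPush ((r.drop (bExt s t (len + 1) r)).foldl aStep
                (none, 0, acc ++ [(s, t, len + 1 + bExt s t (len + 1) r)])) := ih _ _
          _ = _ := by
              rw [hb]
              have h1 : (p :: r).drop (1 + bExt s t (len + 1) r) = r.drop (bExt s t (len + 1) r) := by
                rw [Nat.add_comm]; simp [List.drop_succ_cons]
          -- casts: len + 1 + ↑k = len + ↑(1 + k)
              have h2 : (len + 1 + (bExt s t (len + 1) r : Int))
                  = len + ((1 + bExt s t (len + 1) r : Nat) : Int) := by push_cast; ring
              rw [h1, ← h2]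
      · have hb : bExt s t len (p :: r) = 0 := by
          simp only [bExt]; rw [if_neg h]
        have hstep : aStep (some (s, t), len, acc) p
            = (some (p.1, p.2), 1, acc ++ [(s, t, len)]) := by
          simp only [aStep]
          rw [if_neg]
          intro ⟨h1, h2⟩; exact h ⟨h1.symm, h2.symm⟩
        rw [hb]
        simp only [List.drop_zero, List.foldl_cons, hstep]
        have : aStep (none, 0, acc ++ [(s, t, len + (0 : Nat))]) p
            = (some (p.1, p.2), 1, acc ++ [(s, t, len)]) := by
          simp [aStep]
        rw [this]

-- the whole inner loop of A equals B's run peeling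
theorem aRun_eq_bRuns_aux : ∀ (l : List (Int × Int)) (acc : List (Int × Int × Int)),
    aPush (l.foldl aStep (none, 0, acc)) = acc ++ bRuns l := by
  intro l
  induction hl : l.length using Nat.strong_induction_on generalizing l with
  | _ n ih => ?_
  subst hl
  match l with
  | [] => intro acc; simp [aPush, bRuns]
  | p :: r =>
      intro acc
      have hstep : aStep (none, 0, acc) p = (some (p.1, p.2), 1, acc) := by simp [aStep]
      have hlen : (r.drop (bExt p.1 p.2 1 r)).length < (p :: r).length := by
        have : (r.drop (bExt p.1 p.2 1 r)).length ≤ r.length :=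
          by simp [List.length_drop]
        simp only [List.length_cons]; omega
      calc aPush ((p :: r).foldl aStep (none, 0, acc))
          = aPush (r.foldl aStep (some (p.1, p.2), 1, acc)) := by
            simp [List.foldl_cons, hstep]
        _ = aPush ((r.drop (bExt p.1 p.2 1 r)).foldl aStep
              (none, 0, acc ++ [(p.1, p.2, (1 : Int) + bExt p.1 p.2 1 r)])) := by
            exact aRun_runfold r p.1 p.2 1 acc
        _ = (acc ++ [(p.1, p.2, (1 : Int) + bExt p.1 p.2 1 r)]) ++ bRuns (r.drop (bExt p.1 p.2 1 r)) :=
            ih _ hlen _ rfl _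
        _ = acc ++ bRuns (p :: r) := by
            rw [bRuns]
            simp

theorem aRun_eq_bRuns (l : List (Int × Int)) : aRun l = bRuns l := by
  simpa [aRun] using aRun_eq_bRuns_aux l []

-- ===== VERDICT (by name: the statement is the Claim_ definition above) =====
theorem get_interaction_ranges_spec : Claim_equal_get_interaction_ranges := by
  intro l _ hpre
  unfold Spec_get_interaction_ranges get_interaction_ranges get_interaction_ranges_alt
  by_cases hl : l = []
  · simp [hl]
  · rw [if_neg hl, if_neg hl]
    have := PySem.Dict.items_foldl_insert_fresh (l := l) (k := fun p => p.1)
      (v := fun p => aRun p.2) (d := PySem.Dict.empty)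
      (by intro a _; exact PySem.Dict.contains_empty _)
      (by simpa [Pre_get_interaction_ranges] using hpre)
    rw [this]
    simp [aRun_eq_bRuns, PySem.Dict.empty]
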